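-- pv_equiv track=rewrite | github.com/truongnh28/bilstm-crf-ner | v2/bi_lstm_crf/app/predict.py | tokens_from_tags
-- ===== SOURCE A (Python) =====
-- def tokens_from_tags(sentences, tags_list, begin_tags):
--     """extract entities from tags
--
--     :param sentences: a list of sentence
--     :param tags_list: a list of tags
--     :param begin_tags:
--     :return:
--     """
--     if not tags_list:
--         return []
--
--     def _tokens(sentence, ts):
--         # begins: [(idx, label), ...]
--         all_begin_tags = begin_tags + "O"
--         begins = [(idx, t[2:]) for idx, t in enumerate(ts) if t[0] in all_begin_tags]
--         begins = [
--                      (idx, label)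
--                      for idx, label in begins
--                      if ts[idx] != "O" or (idx > 0 and ts[idx - 1] != "O")
--                  ] + [(len(ts), "")]
--
--         tokens_ = [(sentence[s:e], label) for (s, label), (e, _) in zip(begins[:-1], begins[1:]) if label]
--         return [((t, tag) if tag else t) for t, tag in tokens_]
--
--     tokens_list = [_tokens(sentence, ts) for sentence, ts in zip(sentences, tags_list)]
--     return tokens_list
-- ===== SOURCE B (Python) =====
-- def tokens_from_tags(sentences, tags_list, begin_tags):
--     """Single forward pass per sentence: keep an open segment (start, label),
--     close it at each boundary and at the end."""
--     if not tags_list: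
--         return []
--     boundary_chars = begin_tags + "O"
--     result = []
--     for sentence, ts in zip(sentences, tags_list):
--         out = []
--         start, label = 0, ""
--         for idx, t in enumerate(ts):
--             if t[0] in boundary_chars and (t != "O" or (idx > 0 and ts[idx - 1] != "O")):
--                 if label:
--                     out.append((sentence[start:idx], label))
--                 start, label = idx, t[2:]
--         if label:
--             out.append((sentence[start:len(ts)], label))
--         result.append(out)
--     return result
-- ===== Notes on version B (the rewrite author's own statement) =====
-- stated objective: simpler
-- what changed: Replaces the boundary-list construction plus zip of shifted slices by a single forward loop per sentence that keeps the current open segment (start, label) and closes it at each boundary and at the end.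
import Mathlib
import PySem

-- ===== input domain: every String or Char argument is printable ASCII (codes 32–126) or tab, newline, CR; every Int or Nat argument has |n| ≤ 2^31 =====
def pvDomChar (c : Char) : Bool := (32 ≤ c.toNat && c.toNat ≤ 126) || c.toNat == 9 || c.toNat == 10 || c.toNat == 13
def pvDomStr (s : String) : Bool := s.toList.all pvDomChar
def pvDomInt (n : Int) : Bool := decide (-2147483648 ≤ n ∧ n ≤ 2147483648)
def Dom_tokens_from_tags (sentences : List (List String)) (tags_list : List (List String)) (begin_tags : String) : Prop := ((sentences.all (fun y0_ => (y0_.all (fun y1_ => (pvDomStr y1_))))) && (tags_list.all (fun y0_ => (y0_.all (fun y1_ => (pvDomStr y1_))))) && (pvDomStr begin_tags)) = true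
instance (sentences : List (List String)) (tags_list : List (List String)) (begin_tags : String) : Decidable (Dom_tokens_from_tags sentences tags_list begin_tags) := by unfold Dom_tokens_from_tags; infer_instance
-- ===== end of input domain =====

-- B replaces A's boundary-list + zip-of-shifted-slices by a single forward loop keeping the open segment; objective: simpler.

-- ===== PORT A =====
-- inner helper `_tokens(sentence, ts)`; `t[0]` raises IndexError on an empty tag (excluded by Pre_), here it skips
def pvTokensA (begin_tags : String) (sentence : List String) (ts : List String) : List (List String × String) :=
  let all_begin_tags := begin_tags ++ "O"
  let begins1 : List (Int × String) :=
    (PySem.List.enumerate ts).filterMap (fun p =>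
      match PySem.List.pyGet? p.2.toList 0 with
      | some c => if all_begin_tags.toList.contains c then some (p.1, PySem.Str.slice p.2 (some 2) none) else none
      | none => none)
  let begins : List (Int × String) :=
    begins1.filter (fun p =>
      (PySem.List.pyGetD ts p.1 "" != "O") || (decide (p.1 > 0) && (PySem.List.pyGetD ts (p.1 - 1) "" != "O")))
    ++ [((ts.length : Int), "")]
  let tokens_ : List (List String × String) :=
    ((PySem.List.slice begins none (some (-1))).zip (PySem.List.slice begins (some 1) none)).filterMap
      (fun q => if q.1.2 ≠ "" then some (PySem.List.slice sentence (some q.1.1) (some q.2.1), q.1.2) else none)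
  -- final comprehension `[(t, tag) if tag else t …]`: every kept tag is non-empty, the pair branch is taken
  tokens_.map (fun p => (p.1, p.2))

def tokens_from_tags (sentences : List (List String)) (tags_list : List (List String)) (begin_tags : String) : List (List (List String × String)) :=
  if tags_list = [] then []
  else (sentences.zip tags_list).map (fun p => pvTokensA begin_tags p.1 p.2)

-- ===== PORT B =====
-- loop body of B: at a boundary close the open segment and open a new one, otherwise keep the state
def pvStepB (boundary_chars : List Char) (sentence : List String) (ts : List String)
    (st : List (List String × String) × Int × String) (p : Int × String) :
    List (List String × String) × Int × String :=
  if ((match PySem.List.pyGet? p.2.toList 0 with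
       | some c => boundary_chars.contains c
       | none => false)
      && ((p.2 != "O") || (decide (p.1 > 0) && (PySem.List.pyGetD ts (p.1 - 1) "" != "O")))) then
    (st.1 ++ (if st.2.2 ≠ "" then [(PySem.List.slice sentence (some st.2.1) (some p.1), st.2.2)] else []),
     p.1, PySem.Str.slice p.2 (some 2) none)
  else st

def pvTokensB (boundary_chars : List Char) (sentence : List String) (ts : List String) : List (List String × String) :=
  let st := (PySem.List.enumerate ts).foldl (pvStepB boundary_chars sentence ts) ([], 0, "")
  st.1 ++ (if st.2.2 ≠ "" then [(PySem.List.slice sentence (some st.2.1) (some (ts.length : Int)), st.2.2)] else [])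

def tokens_from_tags_alt (sentences : List (List String)) (tags_list : List (List String)) (begin_tags : String) : List (List (List String × String)) :=
  if tags_list = [] then []
  else
    let boundary_chars := (begin_tags ++ "O").toList
    (sentences.zip tags_list).foldl (fun acc p => acc ++ [pvTokensB boundary_chars p.1 p.2]) []

-- ===== PRECONDITION & SPEC =====
-- Pre_ excludes exactly the inputs where A raises IndexError: an empty tag string `t` in a
-- processed tag list makes `t[0]` raise (only the first len(sentences) tag lists are processed).
def Pre_tokens_from_tags (sentences : List (List String)) (tags_list : List (List String)) (begin_tags : String) : Prop :=
  ∀ ts ∈ tags_list.take sentences.length, ∀ t ∈ ts, t ≠ ""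
instance (sentences : List (List String)) (tags_list : List (List String)) (begin_tags : String) : Decidable (Pre_tokens_from_tags sentences tags_list begin_tags) := by unfold Pre_tokens_from_tags; infer_instance

def pvWitness_tokens_from_tags : List (List String) × List (List String) × String :=
  ([["a", "b", "c"]], [["B-PER", "I-PER", "O"]], "B")

def Spec_tokens_from_tags (sentences : List (List String)) (tags_list : List (List String)) (begin_tags : String) (out : List (List (List String × String))) : Prop := out = tokens_from_tags_alt sentences tags_list begin_tags
instance (sentences : List (List String)) (tags_list : List (List String)) (begin_tags : String) (out : List (List (List String × String))) : Decidable (Spec_tokens_from_tags sentences tags_list begin_tags out) := by unfold Spec_tokens_from_tags; infer_instance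

-- ===== CLAIM (what is proved, stated in full; the proofs are below) =====
def Claim_equal_tokens_from_tags : Prop := ∀ (sentences : List (List String)) (tags_list : List (List String)) (begin_tags : String), Dom_tokens_from_tags sentences tags_list begin_tags → Pre_tokens_from_tags sentences tags_list begin_tags → Spec_tokens_from_tags sentences tags_list begin_tags (tokens_from_tags sentences tags_list begin_tags)

-- ===== LEMMAS AND PROOFS =====

-- proof-side view of the segment emission: consecutive boundary pairs
def pvEmit (sentence : List String) : List (Int × String) → List (List String × String)
  | x :: y :: r =>
      (if x.2 ≠ "" then [(PySem.List.slice sentence (some x.1) (some y.1), x.2)] else []) ++ pvEmit sentence (y :: r)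
  | _ => []

theorem foldl_filter_of_skip {α β : Type} (f : β → α → β) (p : α → Bool)
    (h : ∀ st x, p x = false → f st x = st) :
    ∀ (l : List α) (st : β), l.foldl f st = (l.filter p).foldl f st := by
  intro l
  induction l with
  | nil => intro st; rfl
  | cons x xs ih =>
    intro st
    by_cases hx : p x = true
    · simp [List.filter_cons, hx, ih]
    · have hx' : p x = false := by revert hx; cases p x <;> simp
      simp [List.filter_cons, hx', h st x hx', ih]

theorem foldl_congr_of_mem {α β : Type} {l : List α} {f g : β → α → β}
    (h : ∀ st x, x ∈ l → f st x = g st x) :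
    ∀ st, l.foldl f st = l.foldl g st := by
  induction l with
  | nil => intro st; rfl
  | cons x xs ih =>
    intro st
    simp only [List.foldl_cons]
    rw [h st x (by simp)]
    exact ih (fun st y hy => h st y (by simp [hy])) _

theorem filterMap_if_eq_map_filter {α β : Type} (q : α → Bool) (f : α → β) :
    ∀ l : List α, (l.filterMap (fun x => if q x then some (f x) else none)) = (l.filter q).map f := by
  intro l
  induction l with
  | nil => rfl
  | cons x xs ih =>
    by_cases hx : q x = true
    · simp [List.filterMap_cons, List.filter_cons, hx, ih]
    · have hx' : q x = false := by revert hx; cases q x <;> simp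
      simp [List.filterMap_cons, List.filter_cons, hx', ih]

-- A's zip-of-shifted-slices formulation equals pvEmit
theorem zipform_eq_emit (sentence : List String) :
    ∀ l : List (Int × String),
      ((PySem.List.slice l none (some (-1))).zip (PySem.List.slice l (some 1) none)).filterMap
        (fun q => if q.1.2 ≠ "" then some (PySem.List.slice sentence (some q.1.1) (some q.2.1), q.1.2) else none)
      = pvEmit sentence l
  | [] => by simp [PySem.List.slice_to_neg_one, PySem.List.slice_from_one, pvEmit]
  | [x] => by simp [PySem.List.slice_to_neg_one, PySem.List.slice_from_one, pvEmit]
  | x :: y :: r => by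
    have ih := zipform_eq_emit sentence (y :: r)
    simp only [PySem.List.slice_to_neg_one, PySem.List.slice_from_one, List.tail_cons] at ih ⊢
    rw [List.dropLast_cons₂, List.zip_cons_cons, List.filterMap_cons]
    simp only [ne_eq, ite_not] at ih
    by_cases hx : x.2 = "" <;> simp [pvEmit, hx, ih]

-- closing step on already-labelled boundaries
def pvGStep (sentence : List String)
    (st : List (List String × String) × Int × String) (q : Int × String) :
    List (List String × String) × Int × String :=
  (st.1 ++ (if st.2.2 ≠ "" then [(PySem.List.slice sentence (some st.2.1) (some q.1), st.2.2)] else []),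
   q.1, q.2)

theorem foldl_gstep_emit (sentence : List String) (n : Int) :
    ∀ (bs : List (Int × String)) (acc : List (List String × String)) (s : Int) (l : String),
      (let st := bs.foldl (pvGStep sentence) (acc, s, l)
       st.1 ++ (if st.2.2 ≠ "" then [(PySem.List.slice sentence (some st.2.1) (some n), st.2.2)] else []))
      = acc ++ pvEmit sentence ((s, l) :: bs ++ [(n, "")]) := by
  intro bs
  induction bs with
  | nil =>
    intro acc s l
    simp [pvEmit]
  | cons b r ih =>
    intro acc s l
    simp only [List.foldl_cons]
    have := ih (acc ++ (if l ≠ "" then [(PySem.List.slice sentence (some s) (some b.1), l)] else [])) b.1 b.2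
    simp only [pvGStep] at this ⊢
    rw [this]
    simp [pvEmit, List.append_assoc]

-- B's full boundary test, as a Bool predicate on an enumerate element
def pvBCond (boundary_chars : List Char) (ts : List String) (p : Int × String) : Bool :=
  (match PySem.List.pyGet? p.2.toList 0 with
   | some c => boundary_chars.contains c
   | none => false)
  && ((p.2 != "O") || (decide (p.1 > 0) && (PySem.List.pyGetD ts (p.1 - 1) "" != "O")))

theorem stepB_skip (bc : List Char) (sentence ts : List String) (st : List (List String × String) × Int × String)
    (p : Int × String) (h : pvBCond bc ts p = false) :
    pvStepB bc sentence ts st p = st := by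
  unfold pvStepB
  unfold pvBCond at h
  rw [h]
  simp

theorem pyGetD_enumerate (ts : List String) (p : Int × String) (hp : p ∈ PySem.List.enumerate ts) :
    PySem.List.pyGetD ts p.1 "" = p.2 := by
  rw [PySem.List.mem_enumerate_iff] at hp
  obtain ⟨k, hk, rfl⟩ := hp
  simp [PySem.List.pyGetD_natCast, List.getD_eq_getElem?_getD, hk]

-- per-sentence equivalence
theorem tokensA_eq_tokensB (begin_tags : String) (sentence ts : List String) :
    pvTokensA begin_tags sentence ts = pvTokensB (begin_tags ++ "O").toList sentence ts := by
  simp only [pvTokensA, pvTokensB]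
  set bc := (begin_tags ++ "O").toList with hbc
  set f : Int × String → Int × String := fun p => (p.1, PySem.Str.slice p.2 (some 2) none) with hf
  -- rewrite A's begins-without-sentinel
  have hA1 : (PySem.List.enumerate ts).filterMap (fun p =>
      match PySem.List.pyGet? p.2.toList 0 with
      | some c => if bc.contains c then some (p.1, PySem.Str.slice p.2 (some 2) none) else none
      | none => none)
      = ((PySem.List.enumerate ts).filter (fun p =>
          match PySem.List.pyGet? p.2.toList 0 with
          | some c => bc.contains c
          | none => false)).map f := by
    rw [← filterMap_if_eq_map_filter]
    apply List.filterMap_congr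
    intro p _
    rcases h0 : PySem.List.pyGet? p.2.toList 0 with _ | c
    · simp [h0]
    · by_cases hc : bc.contains c = true <;> simp [h0, hc, hf]
  -- B side: drop non-boundaries, then push the relabelling out of the fold
  have hB1 : (PySem.List.enumerate ts).foldl (pvStepB bc sentence ts) ([], 0, "")
      = ((PySem.List.enumerate ts).filter (pvBCond bc ts)).foldl (pvStepB bc sentence ts) ([], 0, "") :=
    foldl_filter_of_skip _ _ (fun st x hx => stepB_skip bc sentence ts st x hx) _ _
  have hB2 : ((PySem.List.enumerate ts).filter (pvBCond bc ts)).foldl (pvStepB bc sentence ts) ([], 0, "")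
      = ((PySem.List.enumerate ts).filter (pvBCond bc ts)).foldl
          (fun st p => pvGStep sentence st (f p)) ([], 0, "") := by
    apply foldl_congr_of_mem
    intro st x hx
    have hx' : pvBCond bc ts x = true := List.of_mem_filter hx
    unfold pvBCond at hx'
    unfold pvStepB
    rw [hx']
    simp [pvGStep, hf]
  rw [hA1, hB1, hB2, ← List.foldl_map, zipform_eq_emit]
  simp only [Prod.mk.eta, List.map_id']
  have hlist : (List.filter (fun p => PySem.List.pyGetD ts p.1 "" != "O" || decide (p.1 > 0) && PySem.List.pyGetD ts (p.1 - 1) "" != "O")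
        (List.map f (List.filter (fun p =>
            match PySem.List.pyGet? p.2.toList 0 with
            | some c => bc.contains c
            | none => false) (PySem.List.enumerate ts))))
      = List.map f (List.filter (pvBCond bc ts) (PySem.List.enumerate ts)) := by
    rw [List.filter_map]
    congr 1
    rw [List.filter_filter]
    apply List.filter_congr
    intro p hp
    have hts := pyGetD_enumerate ts p hp
    unfold pvBCond
    simp only [Function.comp, hf, hts]
    rcases h0 : PySem.List.pyGet? p.2.toList 0 with _ | c
    · simp [h0]
    · simp [h0, Bool.and_comm]
  have hemit : pvEmit sentence (((0 : Int), "") ::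
      (((PySem.List.enumerate ts).filter (pvBCond bc ts)).map f ++ [((ts.length : Int), "")]))
      = pvEmit sentence ((((PySem.List.enumerate ts).filter (pvBCond bc ts)).map f) ++ [((ts.length : Int), "")]) := by
    rcases h : ((PySem.List.enumerate ts).filter (pvBCond bc ts)).map f ++ [((ts.length : Int), "")] with _ | ⟨y, r⟩
    · exact absurd h (by simp)
    · simp [pvEmit]
  have hg := foldl_gstep_emit sentence (ts.length : Int)
      (((PySem.List.enumerate ts).filter (pvBCond bc ts)).map f) [] 0 ""
  simp only at hg
  rw [hlist, hg]
  simp only [List.nil_append]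
  exact hemit.symm

-- outer fold-append equals outer map
theorem foldl_append_map {α β : Type} (g : α → β) :
    ∀ (l : List α) (acc : List β), l.foldl (fun acc x => acc ++ [g x]) acc = acc ++ l.map g := by
  intro l
  induction l with
  | nil => intro acc; simp
  | cons x xs ih => intro acc; simp [ih]

-- ===== VERDICT (by name: the statement is the Claim_ definition above) =====
theorem tokens_from_tags_spec : Claim_equal_tokens_from_tags := by
  intro sentences tags_list begin_tags _ _
  unfold Spec_tokens_from_tags tokens_from_tags tokens_from_tags_alt
  by_cases h : tags_list = []
  · simp [h]
  · simp only [h, if_neg h]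
    rw [foldl_append_map]
    simp only [List.nil_append]
    apply List.map_congr_left
    intro p _
    exact tokensA_eq_tokensB begin_tags p.1 p.2
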